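-- pv_equiv track=rewrite | github.com/zwonlala/algorithm_python | programmers LV.2/pro42626.py | solution
-- ===== SOURCE A (Python) =====
-- def makeNewScoville(arr):
--     l1 = arr[0]
--     l2 = arr[1]
--     new = l1 + 2 * l2
--
--     return [new] + arr[2:]
--
-- def solution(scoville, K):
--     answer = 0
--
--     while True:
--         lowest = min(scoville)
--
--         if lowest >= K:
--             return answer
--
--         if len(scoville) == 1 and lowest < K:
--             return -1
--
--         sorted(scoville)
--
--         scoville = makeNewScoville(scoville)
--         answer += 1
--
--
--     return answer
-- ===== SOURCE B (Python) =====
-- def solution(scoville, K):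
--     n = len(scoville)
--     # j = largest index whose element is < K (0 if every element is >= K)
--     j = n - 1
--     while j > 0 and scoville[j] >= K:
--         j -= 1
--     # accumulator after j combine steps: scoville[0] + 2*scoville[1] + ... + 2*scoville[j]
--     acc = scoville[0]
--     for i in range(1, j + 1):
--         acc += 2 * scoville[i]
--     # from step j on the whole suffix is >= K, so the running min is just acc
--     k = j
--     while True:
--         if acc >= K:
--             return k
--         if k == n - 1:
--             return -1
--         acc += 2 * scoville[k + 1]
--         k += 1
-- ===== Notes on version B (the rewrite author's own statement) =====
-- stated objective: faster
-- what changed: A recomputes min(scoville) over the whole shrinking list on every combine step (O(n^2)); B finds the last element < K in one backward scan, jumps the fold accumulator straight to that step with one prefix pass, then advances step by step comparing only the accumulator against K (O(n), no list rebuilding).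
-- outside the precondition, e.g. on solution([], 1): A raises ValueError, B raises IndexError
import Mathlib
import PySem

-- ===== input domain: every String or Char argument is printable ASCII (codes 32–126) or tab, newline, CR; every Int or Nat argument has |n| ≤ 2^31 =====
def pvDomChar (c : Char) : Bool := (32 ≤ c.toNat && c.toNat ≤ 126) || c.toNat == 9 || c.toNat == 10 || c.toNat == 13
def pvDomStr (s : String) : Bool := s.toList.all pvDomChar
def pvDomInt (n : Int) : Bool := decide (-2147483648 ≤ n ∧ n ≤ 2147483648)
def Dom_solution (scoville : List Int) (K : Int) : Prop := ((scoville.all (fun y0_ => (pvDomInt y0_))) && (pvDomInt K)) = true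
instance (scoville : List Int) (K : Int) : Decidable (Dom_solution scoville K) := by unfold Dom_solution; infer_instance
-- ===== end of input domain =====

-- B replaces A's per-step min() over the whole shrinking list (O(n^2)) by one backward scan
-- for the last element < K plus an incrementally maintained fold accumulator (O(n)).

-- ===== PORT A =====
def makeNewScoville (arr : List Int) : List Int :=
  match arr with
  | l1 :: l2 :: rest => (l1 + 2 * l2) :: rest
  | _ => []  -- arr[0] / arr[1] would raise IndexError in Python; unreachable (caller guards length)

def solLoop : List Int → Int → Int → Int
  | [], _, _ => 0  -- min([]) raises ValueError in Python; excluded by Pre_solution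
  | [x], K, answer =>
    -- lowest = x; `if lowest >= K: return answer`, then `len == 1 and lowest < K: return -1`
    if K ≤ x then answer else -1
  | a :: b :: r, K, answer =>
    let lowest := (PySem.List.min? (a :: b :: r) (fun y => y)).getD 0
    if K ≤ lowest then answer
    else
      -- `sorted(scoville)` in A: result discarded (no effect); then combine and loop
      solLoop (makeNewScoville (a :: b :: r)) K (answer + 1)
termination_by xs => xs.length
decreasing_by simp [makeNewScoville]

def solution (scoville : List Int) (K : Int) : Int := solLoop scoville K 0

-- ===== PORT B =====
-- `j = n-1; while j > 0 and scoville[j] >= K: j -= 1`  (downward scan, recursion on j)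
def lastBadIdx (scoville : List Int) (K : Int) : Nat → Nat
  | 0 => 0
  | j + 1 =>
    if K ≤ PySem.List.pyGetD scoville ((j : Int) + 1) 0 then lastBadIdx scoville K j
    else j + 1

-- the final `while True` loop of Source B (runs at most n - k more iterations)
def scanLoop (scoville : List Int) (K : Int) (n : Nat) (acc : Int) (k : Nat) : Int :=
  if K ≤ acc then (k : Int)
  else if k = n - 1 then -1
  else if _h : k + 1 < n then
    scanLoop scoville K n (acc + 2 * PySem.List.pyGetD scoville ((k : Int) + 1) 0) (k + 1)
  else -1  -- termination guard only; unreachable when the loop starts with k < n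
termination_by n - k

def solution_alt (scoville : List Int) (K : Int) : Int :=
  let n := scoville.length
  let j := lastBadIdx scoville K (n - 1)
  let acc := (PySem.List.pyRange 1 ((j : Int) + 1) 1).foldl
      (fun a i => a + 2 * PySem.List.pyGetD scoville i 0)
      (PySem.List.pyGetD scoville 0 0)
  scanLoop scoville K n acc j

-- ===== PRECONDITION & SPEC =====
-- Pre_ excludes only the empty list, on which A raises ValueError (min of empty sequence).
def Pre_solution (scoville : List Int) (K : Int) : Prop := scoville ≠ []
instance (scoville : List Int) (K : Int) : Decidable (Pre_solution scoville K) := by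
  unfold Pre_solution; infer_instance

def pvWitness_solution : List Int × Int := ([1, 2, 3, 9, 10, 12], 7)

def Spec_solution (scoville : List Int) (K : Int) (out : Int) : Prop := out = solution_alt scoville K
instance (scoville : List Int) (K : Int) (out : Int) : Decidable (Spec_solution scoville K out) := by
  unfold Spec_solution; infer_instance

-- ===== CLAIM (what is proved, stated in full; the proofs are below) =====
def Claim_equal_solution : Prop := ∀ (scoville : List Int) (K : Int), Dom_solution scoville K → Pre_solution scoville K → Spec_solution scoville K (solution scoville K)

-- ===== LEMMAS AND PROOFS =====

-- K ≤ running min of (a :: t) iff K is ≤ a and every element of t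
theorem le_foldl_min_iff (K : Int) (t : List Int) (a : Int) :
    K ≤ t.foldl min a ↔ K ≤ a ∧ ∀ x ∈ t, K ≤ x := by
  induction t generalizing a with
  | nil => simp
  | cons b t ih =>
    simp only [List.foldl_cons, ih, le_min_iff, List.mem_cons]
    constructor
    · rintro ⟨⟨h1, h2⟩, h3⟩
      refine ⟨h1, fun x hx => ?_⟩
      rcases hx with rfl | hx
      · exact h2
      · exact h3 x hx
    · rintro ⟨h1, h2⟩
      exact ⟨⟨h1, h2 b (Or.inl rfl)⟩, fun x hx => h2 x (Or.inr hx)⟩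

theorem lastBadIdx_le (s : List Int) (K : Int) (j : Nat) : lastBadIdx s K j ≤ j := by
  induction j with
  | zero => simp [lastBadIdx]
  | succ j ih =>
    unfold lastBadIdx
    split
    · omega
    · omega

-- everything strictly after lastBadIdx (up to j) is ≥ K
theorem lastBadIdx_high (s : List Int) (K : Int) (j : Nat) :
    ∀ i : Nat, lastBadIdx s K j < i → i ≤ j → K ≤ PySem.List.pyGetD s (i : Int) 0 := by
  induction j with
  | zero => intro i h1 h2; omega
  | succ j ih =>
    intro i h1 h2
    unfold lastBadIdx at h1
    by_cases hK : K ≤ PySem.List.pyGetD s ((j : Int) + 1) 0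
    · simp only [if_pos hK] at h1
      rcases Nat.lt_or_ge i (j + 1) with hi | hi
      · exact ih i h1 (by omega)
      · have : i = j + 1 := by omega
        subst this
        exact_mod_cast hK
    · simp only [if_neg hK] at h1
      omega

-- a positive lastBadIdx really points at an element < K
theorem lastBadIdx_bad (s : List Int) (K : Int) (j : Nat) (h : 0 < lastBadIdx s K j) :
    ¬ K ≤ PySem.List.pyGetD s ((lastBadIdx s K j : Nat) : Int) 0 := by
  induction j with
  | zero => simp [lastBadIdx] at h
  | succ j ih =>
    unfold lastBadIdx at h ⊢
    by_cases hK : K ≤ PySem.List.pyGetD s ((j : Int) + 1) 0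
    · simp only [if_pos hK] at h ⊢
      exact ih h
    · simp only [if_neg hK] at h ⊢
      exact_mod_cast hK

-- pyGetD at an in-range natural index is getElem
theorem pyGetD_nat_in_range (s : List Int) (i : Nat) (h : i < s.length) :
    PySem.List.pyGetD s (i : Int) 0 = s[i] := by
  rw [PySem.List.pyGetD_natCast]
  exact List.getD_eq_getElem s 0 h

-- high zone: once every element after position k is >= K, A's loop equals B's final scan
theorem high_zone (s : List Int) (K : Int) :
    ∀ (t : List Int) (k : Nat) (acc : Int), k < s.length → t = s.drop (k + 1) →
      (∀ x ∈ t, K ≤ x) →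
      solLoop (acc :: t) K (k : Int) = scanLoop s K s.length acc k := by
  intro t
  induction t with
  | nil =>
    intro k acc hk ht hall
    have hd : s.length ≤ k + 1 := by
      have := List.drop_eq_nil_iff.mp ht.symm
      omega
    rw [scanLoop]
    simp only [solLoop]
    split_ifs with h1 h2 h3 <;> first | rfl | omega
  | cons b t' ih =>
    intro k acc hk ht hall
    have hlt : k + 1 < s.length := by
      have := congrArg List.length ht
      simp only [List.length_cons, List.length_drop] at this
      omega
    have hb : PySem.List.pyGetD s ((k : Int) + 1) 0 = b := by
      rw [show ((k : Int) + 1) = ((k + 1 : Nat) : Int) by push_cast; ring]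
      rw [pyGetD_nat_in_range s (k + 1) hlt]
      have h0 : (s.drop (k + 1))[0]'(by simp [List.length_drop]; omega) = b := by
        simp [← ht]
      rw [← h0]
      simp [List.getElem_drop]
    have ht' : s.drop (k + 2) = t' := by
      have h1 : (s.drop (k + 1)).tail = t' := by simp [← ht]
      rw [← h1, List.tail_drop]
    simp only [solLoop, PySem.List.min?_id_cons, Option.getD_some]
    have hcond : (K ≤ List.foldl min acc (b :: t')) ↔ K ≤ acc := by
      rw [le_foldl_min_iff]
      exact ⟨fun h => h.1, fun h => ⟨h, hall⟩⟩
    by_cases hacc : K ≤ acc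
    · rw [if_pos (hcond.mpr hacc), scanLoop, if_pos hacc]
    · rw [if_neg (fun h => hacc (hcond.mp h))]
      rw [scanLoop, if_neg hacc, if_neg (by omega : ¬ k = s.length - 1), dif_pos hlt]
      have := ih (k + 1) (acc + 2 * b) hlt ht'.symm (fun x hx => hall x (List.mem_cons_of_mem b hx))
      rw [hb]
      rw [show ((k : Int) + 1) = ((k + 1 : Nat) : Int) by push_cast; ring]
      simpa [makeNewScoville] using this

-- low zone: one combine step of A, while an element < K remains ahead
theorem low_step (s : List Int) (K : Int) (k jb : Nat) (acc : Int)
    (hk : k + 1 ≤ jb) (hj : jb < s.length)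
    (hbad : ¬ K ≤ PySem.List.pyGetD s ((jb : Nat) : Int) 0) :
    solLoop (acc :: s.drop (k + 1)) K (k : Int)
      = solLoop ((acc + 2 * PySem.List.pyGetD s (((k : Nat) : Int) + 1) 0) :: s.drop (k + 2)) K ((k : Int) + 1) := by
  have hlt : k + 1 < s.length := by omega
  have hcons : s.drop (k + 1) = s[k + 1] :: s.drop (k + 2) := List.drop_eq_getElem_cons hlt
  rw [pyGetD_nat_in_range s jb hj] at hbad
  have hmem : s[jb] ∈ s.drop (k + 1) := by
    rw [List.mem_iff_getElem]
    exact ⟨jb - (k + 1), by simp [List.length_drop]; omega,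
      by rw [List.getElem_drop]; congr 1; omega⟩
  rw [hcons]
  simp only [solLoop, PySem.List.min?_id_cons, Option.getD_some]
  have hnot : ¬ K ≤ List.foldl min acc (s[k + 1] :: s.drop (k + 2)) := by
    rw [le_foldl_min_iff]
    rintro ⟨-, hall⟩
    exact hbad (hall s[jb] (by rwa [hcons] at hmem))
  rw [if_neg hnot]
  simp only [makeNewScoville]
  rw [show ((k : Int) + 1) = ((k + 1 : Nat) : Int) by push_cast; ring]
  rw [pyGetD_nat_in_range s (k + 1) hlt]

-- chaining the low-zone steps: A's state after k combine steps is B's prefix accumulator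
theorem chain (s : List Int) (K : Int) (hs : s ≠ []) :
    ∀ k : Nat, k ≤ lastBadIdx s K (s.length - 1) →
      solLoop s K 0 =
        solLoop (((PySem.List.pyRange 1 ((k : Int) + 1) 1).foldl
            (fun a i => a + 2 * PySem.List.pyGetD s i 0)
            (PySem.List.pyGetD s 0 0)) :: s.drop (k + 1)) K (k : Int) := by
  intro k
  induction k with
  | zero =>
    intro _
    obtain ⟨a, t, rfl⟩ := List.exists_cons_of_ne_nil hs
    simp [PySem.List.pyRange_one_eq_nil, PySem.List.pyGetD_zero_cons]
  | succ k ih =>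
    intro hk
    have hjpos : 0 < lastBadIdx s K (s.length - 1) := by omega
    have hjlt : lastBadIdx s K (s.length - 1) < s.length := by
      have h1 := lastBadIdx_le s K (s.length - 1)
      have h2 : s.length ≠ 0 := fun h => hs (List.eq_nil_of_length_eq_zero h)
      omega
    have hbad := lastBadIdx_bad s K (s.length - 1) hjpos
    have hstep := low_step s K k (lastBadIdx s K (s.length - 1))
      ((PySem.List.pyRange 1 ((k : Int) + 1) 1).foldl
        (fun a i => a + 2 * PySem.List.pyGetD s i 0) (PySem.List.pyGetD s 0 0))
      (by omega) hjlt hbad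
    rw [ih (by omega), hstep]
    have hsplit : PySem.List.pyRange 1 (((k + 1 : Nat) : Int) + 1) 1
        = PySem.List.pyRange 1 ((k : Int) + 1) 1 ++ [(k : Int) + 1] := by
      rw [show (((k + 1 : Nat) : Int) + 1) = ((k : Int) + 1) + 1 by push_cast; ring]
      exact PySem.List.pyRange_one_succ_right (by omega)
    rw [hsplit, List.foldl_append]
    norm_num

-- ===== VERDICT (by name: the statement is the Claim_ definition above) =====
theorem solution_spec : Claim_equal_solution := by
  intro s K _hDom hPre
  unfold Spec_solution solution solution_alt
  have hs : s ≠ [] := hPre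
  have hn : 0 < s.length := List.length_pos_of_ne_nil hs
  have hjle := lastBadIdx_le s K (s.length - 1)
  have hjlt : lastBadIdx s K (s.length - 1) < s.length := by omega
  rw [chain s K hs (lastBadIdx s K (s.length - 1)) le_rfl]
  apply high_zone s K _ _ _ hjlt rfl
  intro x hx
  rw [List.mem_iff_getElem] at hx
  obtain ⟨m, hm, rfl⟩ := hx
  rw [List.getElem_drop]
  have hml : lastBadIdx s K (s.length - 1) + 1 + m < s.length := by
    simp [List.length_drop] at hm
    omega
  rw [← pyGetD_nat_in_range s _ hml]
  exact lastBadIdx_high s K (s.length - 1) _ (by omega) (by omega)
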